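-- pv_equiv track=rewrite | github.com/almost-matching-exactly/MALTS | Code/untitled0.py | deleteProducts
-- ===== SOURCE A (Python) =====
-- def deleteProducts(ids,m):
--     def setup(ids):
--         d = {}
--         for i in ids:
--             if i not in d:
--                 d[i] = 0
--             d[i] = d[i] + 1
--         d_sort_val = sorted(d.items(), key=lambda kv: kv[1])
--         return d_sort_val
--     dsv = setup(ids)
--     def dp(dsv,m):
--         if m <= 0:
--             return dsv
--         dn = min(m,dsv[0][1])
--         dsv[0] = (dsv[0][0],dsv[0][1] - dn)
--         if dsv[0][1]<=0:
--             del dsv[0]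
--         return dp(dsv,m-dn)
--     return len(dp(dsv,m))
-- ===== SOURCE B (Python) =====
-- def deleteProducts(ids, m):
--     counts = {}
--     for i in ids:
--         counts[i] = counts.get(i, 0) + 1
--     removed = 0
--     acc = 0
--     for c in sorted(counts.values()):
--         acc += c
--         if acc <= m:
--             removed += 1
--     return len(counts) - removed
-- ===== Notes on version B (the rewrite author's own statement) =====
-- stated objective: alternative
-- what changed: Replaces the recursive delete-the-smallest-group-from-the-front loop (repeated list del[0] on the sorted items) by building the counter once, sorting only the counts and doing one linear scan that counts how many prefix sums fit in m; intended as faster (measured 4.21x at the largest size both finished, not confirmed by the check's consistency rule because A rarely finishes there).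
import Mathlib
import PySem

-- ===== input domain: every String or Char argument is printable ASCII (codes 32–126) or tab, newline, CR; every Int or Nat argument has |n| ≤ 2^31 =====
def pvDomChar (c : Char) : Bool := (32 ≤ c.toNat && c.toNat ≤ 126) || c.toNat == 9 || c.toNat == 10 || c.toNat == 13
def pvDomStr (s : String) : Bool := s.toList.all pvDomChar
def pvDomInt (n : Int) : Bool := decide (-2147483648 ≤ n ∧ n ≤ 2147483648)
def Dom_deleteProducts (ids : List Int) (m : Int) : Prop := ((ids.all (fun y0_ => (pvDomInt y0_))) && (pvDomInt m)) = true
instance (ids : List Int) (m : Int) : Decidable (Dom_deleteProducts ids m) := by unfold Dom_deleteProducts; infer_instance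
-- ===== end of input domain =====

-- B replaces A's recursive front-deletion on the sorted (id,count) list by one linear scan
-- over the sorted counts that counts how many prefix sums fit in m (a different algorithm, no del[0]/recursion).

-- ===== PORT A =====
-- A's setup: build the dict with "if i not in d: d[i]=0; d[i] = d[i]+1", then sort items by value.
def pvSetupA (ids : List Int) : List (Int × Int) :=
  let d := ids.foldl (fun d i =>
      let d := if d.contains i then d else d.insert i 0
      d.insert i (d.getD i 0 + 1)) PySem.Dict.empty
  PySem.List.sorted d.items (fun kv => kv.2) false

-- A's dp: none is exactly where Python raises IndexError (dsv[0] on the empty list).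
def pvDpA (dsv : List (Int × Int)) (m : Int) : Option (List (Int × Int)) :=
  if m ≤ 0 then some dsv
  else match dsv with
    | [] => none
    | (k, c) :: t =>
      let dn := min m c
      let c' := c - dn
      if c' ≤ 0 then pvDpA t (m - dn) else pvDpA ((k, c') :: t) (m - dn)
termination_by (dsv.length, m.toNat)
decreasing_by
  · exact Prod.Lex.left _ _ (by simp)
  · exact Prod.Lex.right _ (by omega)

def deleteProducts (ids : List Int) (m : Int) : Int :=
  match pvDpA (pvSetupA ids) m with
  | some r => (r.length : Int)
  | none => 0      -- unreachable under Pre_ (Python raises IndexError there)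

-- ===== PORT B =====
def deleteProducts_alt (ids : List Int) (m : Int) : Int :=
  let counts := ids.foldl (fun d i => d.insert i (d.getD i 0 + 1)) PySem.Dict.empty
  let s := (PySem.List.sorted counts.values (fun c => c) false).foldl
      (fun (s : Int × Int) c =>
        let acc := s.2 + c
        ((if acc ≤ m then s.1 + 1 else s.1), acc)) (0, 0)
  (counts.size : Int) - s.1

-- ===== PRECONDITION & SPEC =====
-- Pre_ excludes exactly the inputs where A raises IndexError: more deletions requested than items (m > len(ids)).
def Pre_deleteProducts (ids : List Int) (m : Int) : Prop := m ≤ (ids.length : Int)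
instance (ids : List Int) (m : Int) : Decidable (Pre_deleteProducts ids m) := by unfold Pre_deleteProducts; infer_instance
def pvWitness_deleteProducts : List Int × Int := ([1, 1, 2, 2, 2, 3], 3)

def Spec_deleteProducts (ids : List Int) (m : Int) (out : Int) : Prop := out = deleteProducts_alt ids m
instance (ids : List Int) (m : Int) (out : Int) : Decidable (Spec_deleteProducts ids m out) := by unfold Spec_deleteProducts; infer_instance

-- ===== CLAIM (what is proved, stated in full; the proofs are below) =====
def Claim_equal_deleteProducts : Prop := ∀ (ids : List Int) (m : Int), Dom_deleteProducts ids m → Pre_deleteProducts ids m → Spec_deleteProducts ids m (deleteProducts ids m)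

-- ===== LEMMAS AND PROOFS =====

-- number of prefix sums ≤ m, peeled one element at a time (proof-side view of B's scan)
def pvCnt (cs : List Int) (m : Int) : Int :=
  match cs with
  | [] => 0
  | c :: t => (if c ≤ m then 1 else 0) + pvCnt t (m - c)

theorem pvCnt_nonpos (cs : List Int) (m : Int) (hpos : ∀ c ∈ cs, 0 < c) (hm : m ≤ 0) :
    pvCnt cs m = 0 := by
  induction cs generalizing m with
  | nil => rfl
  | cons c t ih =>
    have hc : 0 < c := hpos c (by simp)
    simp only [pvCnt]
    rw [if_neg (by omega), ih (m - c) (fun x hx => hpos x (List.mem_cons_of_mem _ hx)) (by omega)]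
    ring

theorem pvFoldB (m : Int) (cs : List Int) (k a : Int) :
    cs.foldl (fun (s : Int × Int) c =>
      let acc := s.2 + c
      ((if acc ≤ m then s.1 + 1 else s.1), acc)) (k, a)
    = (k + pvCnt cs (m - a), a + cs.sum) := by
  induction cs generalizing k a with
  | nil => simp [pvCnt]
  | cons c t ih =>
    simp only [List.foldl_cons, ih, pvCnt, List.sum_cons, Prod.mk.injEq]
    constructor
    · by_cases h : a + c ≤ m
      · rw [if_pos h, if_pos (by omega)]; ring_nf
      · rw [if_neg h, if_neg (by omega)]; ring_nf
    · ring

theorem pvDpA_spec (l : List (Int × Int)) (m : Int)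
    (hpos : ∀ p ∈ l, 0 < p.2) (hm : m ≤ (l.map Prod.snd).sum) :
    ∃ r, pvDpA l m = some r ∧ (r.length : Int) = (l.length : Int) - pvCnt (l.map Prod.snd) m := by
  induction l generalizing m with
  | nil =>
    refine ⟨[], ?_, ?_⟩
    · rw [pvDpA]; simp at hm ⊢; omega
    · simp [pvCnt]
  | cons p t ih =>
    obtain ⟨k, c⟩ := p
    have hc : 0 < c := hpos (k, c) (by simp)
    have hpt : ∀ q ∈ t, 0 < q.2 := fun q hq => hpos q (by simp [hq])
    by_cases h0 : m ≤ 0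
    · refine ⟨(k, c) :: t, by rw [pvDpA]; simp [h0], ?_⟩
      have : pvCnt (((k, c) :: t).map Prod.snd) m = 0 := by
        apply pvCnt_nonpos _ _ _ h0
        intro x hx; simp only [List.mem_map] at hx
        obtain ⟨q, hq, rfl⟩ := hx; exact hpos q hq
      rw [this]; ring
    · by_cases hcm : c ≤ m
      · -- whole first group deleted
        have hdn : min m c = c := by omega
        obtain ⟨r, hr, hlen⟩ := ih (m - c) hpt (by simp at hm ⊢; omega)
        refine ⟨r, ?_, ?_⟩
        · rw [pvDpA]; simp only [if_neg h0, hdn]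
          rw [if_pos (by omega)]; exact hr
        · simp only [List.map_cons, pvCnt, if_pos hcm, List.length_cons]
          push_cast
          omega
      · -- first group only shrinks; m is used up
        have hdn : min m c = m := by omega
        refine ⟨(k, c - m) :: t, ?_, ?_⟩
        · rw [pvDpA]; simp only [if_neg h0, hdn]
          rw [if_neg (by omega)]
          rw [pvDpA]; simp
        · simp only [List.map_cons, pvCnt, if_neg hcm, List.length_cons]
          have : pvCnt (t.map Prod.snd) (m - c) = 0 := by
            apply pvCnt_nonpos _ _ _ (by omega)
            intro x hx; simp only [List.mem_map] at hx
            obtain ⟨q, hq, rfl⟩ := hx; exact hpt q hq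
          rw [this]; push_cast; ring

-- A's dict loop and B's dict loop compute the same dict.
theorem pvStep_eq :
    (fun (d : PySem.Dict Int Int) i =>
      let d := if d.contains i then d else d.insert i 0
      d.insert i (d.getD i 0 + 1))
    = (fun (d : PySem.Dict Int Int) i => d.insert i (d.getD i 0 + 1)) := by
  funext d i
  by_cases h : d.contains i
  · simp [h]
  · simp only [h, Bool.false_eq_true, if_false]
    rw [PySem.Dict.getD_insert_self, PySem.Dict.insert_insert_self,
        PySem.Dict.getD_of_not_contains _ _ (by simpa using h)]

-- sum of the counter's values is the length of the list
theorem pvSumValues (ids : List Int) :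
    ((PySem.Dict.counter ids).items.map Prod.snd).sum = (ids.length : Int) := by
  rw [PySem.Dict.items_counter]
  have hperm : (PySem.Set.ofList ids).Perm ids.dedup := by
    rw [List.perm_ext_iff_of_nodup (PySem.Set.nodup_ofList ids) ids.nodup_dedup]
    intro a; rw [PySem.Set.mem_ofList, List.mem_dedup]
  calc (((PySem.Set.ofList ids).map (fun k => (k, (ids.count k : Int)))).map Prod.snd).sum
      = ((PySem.Set.ofList ids).map (fun k => (ids.count k : Int))).sum := by
        simp [List.map_map, Function.comp_def]
    _ = (ids.dedup.map (fun k => (ids.count k : Int))).sum :=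
        List.Perm.sum_eq (hperm.map _)
    _ = ((ids.dedup.map (fun k => ids.count k)).sum : Int) := by
        rw [Nat.cast_list_sum, List.map_map]; rfl
    _ = (ids.length : Int) := by
        rw [List.sum_map_count_dedup_eq_length]

-- the sorted value list of A's sorted items equals B's sorted values
theorem pvSortedValues (d : PySem.Dict Int Int) :
    (PySem.List.sorted d.items (fun kv => kv.2) false).map Prod.snd
    = PySem.List.sorted d.values (fun c => c) false := by
  symm
  apply PySem.List.sorted_id_eq_of_perm_of_pairwise
  · exact (PySem.List.sorted_perm d.items (fun kv => kv.2) false).map Prod.snd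
  · exact PySem.List.sorted_map_key_pairwise d.items (fun kv => kv.2)

-- ===== VERDICT (by name: the statement is the Claim_ definition above) =====
theorem deleteProducts_spec : Claim_equal_deleteProducts := by
  intro ids m _ hpre
  unfold Spec_deleteProducts deleteProducts deleteProducts_alt pvSetupA
  rw [pvStep_eq, PySem.Dict.foldl_insert_getD_add_one_eq_counter]
  set d := PySem.Dict.counter ids with hd
  have hpos : ∀ p ∈ PySem.List.sorted d.items (fun kv => kv.2) false, 0 < p.2 := by
    intro p hp
    rw [PySem.List.mem_sorted] at hp
    rw [hd, PySem.Dict.items_counter] at hp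
    simp only [List.mem_map] at hp
    obtain ⟨k, hk, rfl⟩ := hp
    rw [PySem.Set.mem_ofList] at hk
    simpa using List.count_pos_iff.mpr hk
  have hsum : ((PySem.List.sorted d.items (fun kv => kv.2) false).map Prod.snd).sum
      = (ids.length : Int) := by
    rw [List.Perm.sum_eq ((PySem.List.sorted_perm d.items (fun kv => kv.2) false).map Prod.snd)]
    exact pvSumValues ids
  obtain ⟨r, hr, hlen⟩ := pvDpA_spec _ m hpos (by rw [hsum]; exact hpre)
  rw [hr]
  simp only [pvFoldB]
  rw [hlen, ← pvSortedValues, PySem.List.length_sorted]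
  have hsize : (d.items.length : Int) = (d.size : Int) := rfl
  rw [show m - 0 = m by ring, hsize]
  ring
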